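-- pv_equiv track=rewrite | github.com/ulfili/python | EXAM/exam3/exam.py | count_double_chars
-- ===== SOURCE A (Python) =====
-- def count_double_chars(s: str) -> int:
--     """
--     Count only double symbols.
--
--     Count how many double symbols are in the text. You have to only count pairs.
--     Therefore, a pair of symbols which is not preceded or followed by the same symbol.
--     If there are three or more of the same symbol, then this is not a pair and doesn't count.
--     Any printable symbol counts (letters, digits, punctuation, space etc.).
--
--     assert count_double_chars("abc") == 0
--     assert count_double_chars("aabc") == 1
--     assert count_double_chars("aaabc") == 0  # (three "a"-s doesn't count)
--     assert count_double_chars("aaaabc") == 0  # (four "a"-s also doesn't count)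
--     assert count_double_chars("aabbc") == 2
--     assert count_double_chars("") == 0
--     assert count_double_chars("abbcdd") == 2
--     assert count_double_chars("aabbaa") == 3
--     assert count_double_chars(",,!?") == 1
--     assert count_double_chars("a  b  =") == 2
--     """
--     result = 0
--
--     for i in range(len(s)):
--         if i < len(s) - 1:
--             if s[i] == s[i + 1]:
--                 if (i == 0 or s[i - 1] != s[i]) and (i == len(s) - 2 or s[i + 1] != s[i + 2]):
--                     result += 1
--     return result
-- ===== SOURCE B (Python) =====
-- def count_double_chars(s: str) -> int:
--     # Run-length decomposition: one pass accumulating the current run length,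
--     # counting a run when it closes iff its length is exactly 2.
--     total = 0
--     run = 0
--     prev = None
--     for ch in s:
--         if ch == prev:
--             run += 1
--         else:
--             if run == 2:
--                 total += 1
--             run = 1
--             prev = ch
--     if run == 2:
--         total += 1
--     return total
-- ===== Notes on version B (the rewrite author's own statement) =====
-- stated objective: simpler
-- what changed: Replaces A's per-index neighbour comparisons (s[i-1], s[i], s[i+1], s[i+2] over range(len(s))) with a single run-length pass that counts a run when it closes iff its length is exactly 2.
import Mathlib
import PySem

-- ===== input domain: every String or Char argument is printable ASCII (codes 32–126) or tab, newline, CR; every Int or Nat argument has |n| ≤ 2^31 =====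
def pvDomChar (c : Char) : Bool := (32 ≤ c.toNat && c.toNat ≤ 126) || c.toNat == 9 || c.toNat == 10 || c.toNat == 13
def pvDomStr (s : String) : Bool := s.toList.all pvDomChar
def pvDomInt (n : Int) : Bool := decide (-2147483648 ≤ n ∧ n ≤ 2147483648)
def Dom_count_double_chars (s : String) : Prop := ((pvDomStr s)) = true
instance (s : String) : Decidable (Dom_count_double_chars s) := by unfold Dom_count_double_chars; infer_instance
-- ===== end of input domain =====

-- B replaces A's per-index neighbour comparisons by a single run-length pass (simpler decomposition).

-- ===== PORT A =====
def count_double_chars (s : String) : Int :=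
  (PySem.List.pyRange 0 (PySem.Str.len s) 1).foldl
    (fun result i =>
      if i < PySem.Str.len s - 1 then
        if PySem.Str.pyGet? s i = PySem.Str.pyGet? s (i + 1) then
          if (i = 0 ∨ PySem.Str.pyGet? s (i - 1) ≠ PySem.Str.pyGet? s i) ∧
             (i = PySem.Str.len s - 2 ∨ PySem.Str.pyGet? s (i + 1) ≠ PySem.Str.pyGet? s (i + 2)) then
            result + 1
          else result
        else result
      else result) 0

-- ===== PORT B =====
def count_double_chars_alt (s : String) : Int :=
  let st := s.toList.foldl
    (fun (st : Int × Int × Option Char) ch =>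
      if some ch = st.2.2 then (st.1, st.2.1 + 1, st.2.2)
      else ((if st.2.1 = 2 then st.1 + 1 else st.1), 1, some ch))
    (0, 0, none)
  if st.2.1 = 2 then st.1 + 1 else st.1

-- ===== PRECONDITION & SPEC =====
def Spec_count_double_chars (s : String) (out : Int) : Prop := out = count_double_chars_alt s
instance (s : String) (out : Int) : Decidable (Spec_count_double_chars s out) := by unfold Spec_count_double_chars; infer_instance

-- ===== CLAIM (what is proved, stated in full; the proofs are below) =====
def Claim_equal_count_double_chars : Prop := ∀ (s : String), Dom_count_double_chars s → Spec_count_double_chars s (count_double_chars s)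

-- ===== LEMMAS AND PROOFS =====

-- index-window predicate equivalent to A's loop body condition at index k (prev abstracts s[k-1])
def pvW (prev : Option Char) (l : List Char) (k : Nat) : Bool :=
  decide ((k + 1 < l.length) ∧ l[k]? = l[k+1]? ∧
    ((if k = 0 then prev else l[k-1]?) ≠ l[k]?) ∧
    (l.length = k + 2 ∨ l[k+1]? ≠ l[k+2]?))

-- structural window count (spec mediating between the two ports)
def pvCnt (prev : Option Char) : List Char → Int
  | [] => 0
  | [_] => 0
  | a :: b :: t =>
    (if a = b ∧ prev ≠ some a ∧ t.head? ≠ some b then 1 else 0) + pvCnt (some a) (b :: t)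

-- run-accumulator recursion matching B's fold state
def pvGo (c : Char) (k : Int) : List Char → Int
  | [] => if k = 2 then 1 else 0
  | x :: xs => if x = c then pvGo c (k + 1) xs else (if k = 2 then 1 else 0) + pvGo x 1 xs

theorem pvW_succ (prev : Option Char) (a : Char) (r : List Char) (k : Nat) :
    pvW prev (a :: r) (k + 1) = pvW (some a) r k := by
  unfold pvW
  rw [decide_eq_decide]
  cases k with
  | zero =>
    simp only [List.getElem?_cons_succ, List.length_cons, List.getElem?_cons_zero]
    constructor <;> rintro ⟨h1, h2, h3, h4⟩ <;>
      refine ⟨by omega, h2, by simpa using h3, ?_⟩ <;>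
      (rcases h4 with h | h; · left; omega
       · right; exact h)
  | succ m =>
    simp only [List.getElem?_cons_succ, List.length_cons, Nat.add_sub_cancel,
      Nat.succ_ne_zero, if_false, if_neg (Nat.succ_ne_zero m)]
    constructor <;> rintro ⟨h1, h2, h3, h4⟩ <;>
      refine ⟨by omega, h2, by simpa using h3, ?_⟩ <;>
      (rcases h4 with h | h; · left; omega
       · right; exact h)

theorem pvCnt_eq_countP (l : List Char) (prev : Option Char) :
    ((List.range l.length).countP (pvW prev l) : Int) = pvCnt prev l := by
  induction l generalizing prev with
  | nil => simp [pvCnt]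
  | cons a r ih =>
    have hshift : (List.range (a :: r).length).countP (pvW prev (a :: r))
        = (if pvW prev (a :: r) 0 then 1 else 0) + (List.range r.length).countP (pvW (some a) r) := by
      have hr : List.range (r.length + 1) = 0 :: (List.range r.length).map Nat.succ :=
        List.range_succ_eq_map (n := r.length)
      simp only [List.length_cons, hr, List.countP_cons, List.countP_map]
      have hs : ((pvW prev (a :: r)) ∘ Nat.succ) = pvW (some a) r :=
        funext fun k => pvW_succ prev a r k
      rw [hs]
      by_cases h : pvW prev (a :: r) 0 <;> simp [h] <;> omega
    rw [hshift]
    cases r with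
    | nil => simp [pvW, pvCnt]
    | cons b t =>
      have hw : (pvW prev (a :: b :: t) 0 = true) ↔ (a = b ∧ prev ≠ some a ∧ t.head? ≠ some b) := by
        unfold pvW
        simp only [decide_eq_true_eq]
        constructor
        · rintro ⟨-, h1, h2, h3⟩
          have hab : a = b := by simpa using h1
          refine ⟨hab, by simpa [hab] using h2, ?_⟩
          rcases h3 with h3 | h3
          · have ht : t = [] := by
              have : t.length = 0 := by simpa using h3
              exact List.length_eq_zero_iff.mp this
            simp [ht]
          · cases t with
            | nil => simp
            | cons c u => simpa [eq_comm] using h3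
        · rintro ⟨h1, h2, h3⟩
          refine ⟨by simp, by simp [h1], by simpa [h1] using h2, ?_⟩
          cases t with
          | nil => left; simp
          | cons c u => right; simpa [eq_comm] using h3
      simp only [pvCnt]
      push_cast
      rw [ih (some a)]
      congr 1
      exact if_congr hw rfl rfl

-- A's fold equals the window count with no previous character
theorem pvA_eq (s : String) : count_double_chars s = pvCnt none s.toList := by
  unfold count_double_chars
  have hlen : PySem.Str.len s = (s.toList.length : Int) := by simp
  rw [hlen, PySem.List.pyRange_one]
  simp only [sub_zero, Int.toNat_natCast, List.foldl_map, zero_add]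
  have hbody : ∀ (acc : Int) (k : Nat), k ∈ List.range s.toList.length →
      (if (k : Int) < ((s.toList.length : Int)) - 1 then
        if PySem.Str.pyGet? s k = PySem.Str.pyGet? s ((k : Int) + 1) then
          if ((k : Int) = 0 ∨ PySem.Str.pyGet? s ((k : Int) - 1) ≠ PySem.Str.pyGet? s k) ∧
             ((k : Int) = ((s.toList.length : Int)) - 2 ∨
               PySem.Str.pyGet? s ((k : Int) + 1) ≠ PySem.Str.pyGet? s ((k : Int) + 2)) then
            acc + 1
          else acc
        else acc
      else acc) = if pvW none s.toList k then acc + 1 else acc := by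
    intro acc k _
    set l := s.toList with hl
    have h1 : PySem.Str.pyGet? s (k : Int) = l[k]? := PySem.Str.pyGet?_natCast s k
    have h2 : PySem.Str.pyGet? s ((k : Int) + 1) = l[k+1]? := by
      rw [show ((k : Int) + 1) = ((k + 1 : Nat) : Int) by push_cast; ring]
      exact PySem.Str.pyGet?_natCast s _
    have h3 : PySem.Str.pyGet? s ((k : Int) + 2) = l[k+2]? := by
      rw [show ((k : Int) + 2) = ((k + 2 : Nat) : Int) by push_cast; ring]
      exact PySem.Str.pyGet?_natCast s _
    by_cases hk : k + 1 < l.length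
    · have hg : ((k : Int)) < ((l.length : Int)) - 1 := by push_cast; omega
      rw [if_pos hg, h1, h2, h3]
      by_cases he : l[k]? = l[k+1]?
      · rw [if_pos he]
        have hcond : (((k : Int) = 0 ∨ PySem.Str.pyGet? s ((k : Int) - 1) ≠ l[k]?) ∧
             ((k : Int) = ((l.length : Int)) - 2 ∨ l[k+1]? ≠ l[k+2]?))
            ↔ (pvW none l k = true) := by
          unfold pvW
          simp only [decide_eq_true_eq]
          constructor
          · rintro ⟨hA, hB⟩
            refine ⟨hk, he, ?_, ?_⟩
            · by_cases hk0 : k = 0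
              · have h0 : l ≠ [] := by intro h; rw [h] at hk; simp at hk
                simp [hk0, h0]
              · rw [if_neg hk0]
                rcases hA with hA | hA
                · exact absurd (by exact_mod_cast hA : k = 0) hk0
                · rwa [show ((k : Int) - 1) = ((k - 1 : Nat) : Int) by push_cast; omega,
                    PySem.Str.pyGet?_natCast] at hA
            · rcases hB with hB | hB
              · left; push_cast at hB; omega
              · right; exact hB
          · rintro ⟨-, -, hP, hQ⟩
            constructor
            · by_cases hk0 : k = 0
              · left; exact_mod_cast congrArg (Nat.cast : Nat → Int) hk0
              · right
                rw [show ((k : Int) - 1) = ((k - 1 : Nat) : Int) by push_cast; omega,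
                  PySem.Str.pyGet?_natCast]
                rw [if_neg hk0] at hP; exact hP
            · rcases hQ with hQ | hQ
              · left; push_cast; omega
              · right; exact hQ
        by_cases hc : pvW none l k
        · rw [if_pos (hcond.mpr hc), if_pos hc]
        · rw [if_neg (fun h => hc (hcond.mp h)), if_neg hc]
      · rw [if_neg he]
        have hf : pvW none l k = false := by
          unfold pvW; simp only [decide_eq_false_iff_not]; tauto
        simp [hf]
    · have hg : ¬ ((k : Int)) < ((l.length : Int)) - 1 := by push_cast; omega
      rw [if_neg hg]
      have hf : pvW none l k = false := by
        unfold pvW; simp only [decide_eq_false_iff_not]; tauto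
      simp [hf]
  calc List.foldl _ 0 (List.range s.toList.length)
      = List.foldl (fun (acc : Int) (k : Nat) => if pvW none s.toList k then acc + 1 else acc) 0
          (List.range s.toList.length) := PySem.List.foldl_congr_mem _ _ _ _ hbody
    _ = 0 + (((List.range s.toList.length).countP (pvW none s.toList) : Nat) : Int) :=
        PySem.List.foldl_if_add_one _ _ _
    _ = pvCnt none s.toList := by rw [zero_add, pvCnt_eq_countP]

-- B's fold finalised equals the run recursion
theorem pvB_fold (xs : List Char) : ∀ (t k : Int) (c : Char),
    (let st := xs.foldl
      (fun (st : Int × Int × Option Char) ch =>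
        if some ch = st.2.2 then (st.1, st.2.1 + 1, st.2.2)
        else ((if st.2.1 = 2 then st.1 + 1 else st.1), 1, some ch))
      (t, k, some c)
     if st.2.1 = 2 then st.1 + 1 else st.1) = t + pvGo c k xs := by
  induction xs with
  | nil =>
    intro t k c
    simp only [List.foldl_nil, pvGo]
    by_cases h : k = 2 <;> simp [h]
  | cons x xs ih =>
    intro t k c
    by_cases hx : x = c
    · simp only [List.foldl_cons, hx, if_true]
      simp only [pvGo, hx]
      rw [if_pos trivial]
      exact ih t (k + 1) c
    · simp only [List.foldl_cons]
      rw [if_neg (by simp [hx] : ¬ (some x = some c))]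
      rw [ih (if k = 2 then t + 1 else t) 1 x]
      simp only [pvGo]
      rw [if_neg hx]
      by_cases h2 : k = 2 <;> simp [h2] <;> ring

-- the run recursion produces the window count (triple statement, structural induction)
theorem pvGo_cnt (xs : List Char) :
    (∀ (c : Char) (prev : Option Char), prev ≠ some c → pvGo c 1 xs = pvCnt prev (c :: xs)) ∧
    (∀ (c : Char), pvGo c 2 xs = (if xs.head? ≠ some c then 1 else 0) + pvCnt (some c) (c :: xs)) ∧
    (∀ (c : Char) (k : Int), 3 ≤ k → pvGo c k xs = pvCnt (some c) (c :: xs)) := by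
  induction xs with
  | nil =>
    refine ⟨?_, ?_, ?_⟩
    · intro c prev _; simp [pvGo, pvCnt]
    · intro c; simp [pvGo, pvCnt]
    · intro c k hk
      simp only [pvGo, pvCnt]
      rw [if_neg (by omega : ¬ k = 2)]
  | cons a r ih =>
    obtain ⟨ihG, ih2, ihH⟩ := ih
    refine ⟨?_, ?_, ?_⟩
    · intro c prev hprev
      by_cases ha : a = c
      · subst ha
        simp [pvGo]
        rw [ih2 a]
        by_cases hh : r.head? = some a
        · cases r with
          | nil => simp at hh
          | cons b t =>
            simp only [List.head?_cons, Option.some.injEq] at hh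
            subst hh
            simp [pvCnt, hprev]
        · simp [pvCnt, hh, hprev]
      · simp only [pvGo]
        rw [if_neg ha, if_neg (by norm_num : ¬ (1 : Int) = 2), zero_add,
          ihG a (some c) (by simp [Ne.symm ha])]
        simp [pvCnt, Ne.symm ha]
    · intro c
      by_cases ha : a = c
      · subst ha
        simp [pvGo]
        rw [ihH a 3 (by norm_num)]
        simp [pvCnt]
      · simp only [pvGo]
        rw [if_neg ha]
        rw [if_pos trivial, ihG a (some c) (by simp [Ne.symm ha])]
        simp [pvCnt, Ne.symm ha]
        exact ha
    · intro c k hk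
      by_cases ha : a = c
      · subst ha
        simp only [pvGo]
        rw [if_pos trivial, ihH a (k + 1) (by omega)]
        simp [pvCnt]
      · simp only [pvGo]
        rw [if_neg ha, if_neg (by omega : ¬ k = 2), zero_add,
          ihG a (some c) (by simp [Ne.symm ha])]
        simp [pvCnt, Ne.symm ha]

theorem pvB_eq (s : String) : count_double_chars_alt s = pvCnt none s.toList := by
  unfold count_double_chars_alt
  cases hl : s.toList with
  | nil => simp [pvCnt]
  | cons a xs =>
    rw [List.foldl_cons, if_neg (by simp : ¬ (some a = (none : Option Char)))]
    simp only [if_neg (by norm_num : ¬ (0 : Int) = 2)]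
    have hf := pvB_fold xs 0 1 a
    simp only at hf ⊢
    rw [hf, zero_add]
    exact (pvGo_cnt xs).1 a none (by simp)

-- ===== VERDICT (by name: the statement is the Claim_ definition above) =====
theorem count_double_chars_spec : Claim_equal_count_double_chars := by
  intro s _
  unfold Spec_count_double_chars
  rw [pvA_eq, pvB_eq]
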